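-- pv_equiv track=rewrite | github.com/MuShaf-NMS/diya-challenge-1 | palindrome.py | kata
-- ===== SOURCE A (Python) =====
-- def kata(kt):
--     h = 0
--     for i in range(len(kt)):
--         if kt[i] == ['']:
--             continue
--         for j in kt[i]:
--             a = j
--             b = ''
--             for k in range(len(j)-1,-1,-1):
--                 b += j[k]
--                 if a == b:
--                     h += 1
--     return h
-- ===== SOURCE B (Python) =====
-- def _is_pal(s):
--     i = 0
--     j = len(s) - 1
--     while i < j:
--         if s[i] != s[j]:
--             return False
--         i += 1
--         j -= 1
--     return True
--
--
-- def kata(kt):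
--     total = 0
--     for row in kt:
--         for s in row:
--             if s and _is_pal(s):
--                 total += 1
--     return total
-- ===== Notes on version B (the rewrite author's own statement) =====
-- stated objective: faster
-- what changed: B counts non-empty palindromes with an early-exit two-pointer scan (s[i] vs s[j] from both ends) instead of A's per-character reversed-string rebuild with a full string comparison after every appended character, and drops A's redundant [''] row guard.
import Mathlib
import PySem

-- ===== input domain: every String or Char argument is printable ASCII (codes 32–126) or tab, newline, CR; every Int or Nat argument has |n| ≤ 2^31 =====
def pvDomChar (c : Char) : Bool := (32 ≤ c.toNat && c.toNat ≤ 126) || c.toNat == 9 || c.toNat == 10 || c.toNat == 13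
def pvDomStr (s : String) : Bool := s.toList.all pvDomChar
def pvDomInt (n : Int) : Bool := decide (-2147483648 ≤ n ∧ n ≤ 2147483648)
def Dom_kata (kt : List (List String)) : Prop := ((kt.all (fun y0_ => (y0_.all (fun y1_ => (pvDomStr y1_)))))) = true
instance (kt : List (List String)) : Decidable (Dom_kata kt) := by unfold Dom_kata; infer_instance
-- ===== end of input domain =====

-- B counts non-empty palindromes with an early-exit two-pointer scan instead of A's
-- per-character reversed-string rebuild and compare (measured faster in a timing run).


-- ===== PORT A =====
-- inner-loop body: b += j[k]; if a == b: h += 1   (state = (b, h), strings as List Char)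
def kataStep (a : List Char) (st : List Char × Int) (k : Int) : List Char × Int :=
  let b := st.1 ++ [PySem.List.pyGetD a k ' ']
  if a = b then (b, st.2 + 1) else (b, st.2)

-- body of the outer 'for i' loop: skip [''], else run the 'for j' loop with the countdown build
def kataRow (h : Int) (row : List String) : Int :=
  if row = [""] then h
  else row.foldl (fun h j =>
    let a := j.toList
    ((PySem.List.pyRange ((a.length : Int) - 1) (-1) (-1)).foldl (kataStep a) ([], h)).2) h

def kata (kt : List (List String)) : Int :=
  (PySem.List.pyRange 0 (PySem.List.len kt) 1).foldl
    (fun h i => kataRow h (PySem.List.pyGetD kt i [])) 0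

-- ===== PORT B =====
-- _is_pal's while loop (s[i], s[j] are always in range here: 0 ≤ i < j ≤ len(s)-1)
def isPalGo (s : List Char) (i j : Nat) : Bool :=
  if i < j then
    if s.getD i ' ' ≠ s.getD j ' ' then false
    else isPalGo s (i + 1) (j - 1)
  else true
termination_by j - i

def kata_alt (kt : List (List String)) : Int :=
  kt.foldl (fun total row =>
    row.foldl (fun total s =>
      if s.toList ≠ [] ∧ isPalGo s.toList 0 (s.toList.length - 1) then total + 1 else total)
      total) 0

-- ===== PRECONDITION & SPEC =====
def Spec_kata (kt : List (List String)) (out : Int) : Prop := out = kata_alt kt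
instance (kt : List (List String)) (out : Int) : Decidable (Spec_kata kt out) := by unfold Spec_kata; infer_instance

-- ===== CLAIM (what is proved, stated in full; the proofs are below) =====
def Claim_equal_kata : Prop := ∀ (kt : List (List String)), Dom_kata kt → Spec_kata kt (kata kt)

-- ===== LEMMAS AND PROOFS =====

-- what the two-pointer loop decides on the window [i, j]
lemma isPalGo_iff (cs : List Char) : ∀ d i j, j - i = d →
    (isPalGo cs i j = true ↔ ∀ k, i ≤ k → k ≤ j → cs.getD k ' ' = cs.getD (i + j - k) ' ') := by
  intro d
  induction d using Nat.strong_induction_on with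
  | _ d ih =>
    intro i j hd
    by_cases hij : i < j
    · rw [isPalGo]
      rw [if_pos hij]
      by_cases hne : cs.getD i ' ' ≠ cs.getD j ' '
      · rw [if_pos hne]
        simp only [Bool.false_eq_true, false_iff]
        intro hall
        exact hne (by simpa [show i + j - i = j by omega] using hall i le_rfl (by omega))
      · rw [if_neg hne]
        rw [not_not] at hne
        rw [ih ((j - 1) - (i + 1)) (by omega) (i + 1) (j - 1) rfl]
        constructor
        · intro hin k hk1 hk2
          rcases (by omega : k = i ∨ k = j ∨ (i + 1 ≤ k ∧ k ≤ j - 1)) with hk | hk | hk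
          · rw [hk, show i + j - i = j by omega]; exact hne
          · rw [hk, show i + j - j = i by omega]; exact hne.symm
          · have := hin k hk.1 hk.2
            rwa [show (i + 1) + (j - 1) - k = i + j - k by omega] at this
        · intro hall k hk1 hk2
          have := hall k (by omega) (by omega)
          rwa [show i + j - k = (i + 1) + (j - 1) - k by omega] at this
    · rw [isPalGo]
      rw [if_neg hij]
      simp only [true_iff]
      intro k hk1 hk2
      rw [show k = i by omega, show i + j - i = i by omega]

-- hence on a nonempty string it decides "palindrome"
lemma isPalGo_pal (cs : List Char) (hne : cs ≠ []) :
    isPalGo cs 0 (cs.length - 1) = true ↔ cs.reverse = cs := by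
  have hpos : 0 < cs.length := List.length_pos_iff.mpr hne
  rw [isPalGo_iff cs (cs.length - 1) 0 (cs.length - 1) rfl]
  simp only [Nat.zero_le, Nat.zero_add, true_implies]
  constructor
  · intro hall
    apply List.ext_getElem?
    intro i
    by_cases hi : i < cs.length
    · rw [List.getElem?_reverse hi]
      have h2 : cs.length - 1 - i < cs.length := by omega
      have := hall i (by omega)
      rw [List.getD_eq_getElem cs ' ' hi, List.getD_eq_getElem cs ' ' h2] at this
      rw [List.getElem?_eq_getElem hi, List.getElem?_eq_getElem h2, this]
    · rw [List.getElem?_eq_none (by simpa using (by omega : cs.length ≤ i)),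
          List.getElem?_eq_none (by omega)]
  · intro hpal i hi
    have h1 : i < cs.length := by omega
    have h2 : cs.length - 1 - i < cs.length := by omega
    have hq : cs.reverse[i]? = cs[i]? := by rw [hpal]
    rw [List.getElem?_reverse h1, List.getElem?_eq_getElem h1, List.getElem?_eq_getElem h2] at hq
    rw [List.getD_eq_getElem cs ' ' h1, List.getD_eq_getElem cs ' ' h2]
    exact (Option.some.inj hq).symm

-- invariant of A's inner loop: after counting down from m-1, b is the full reverse and
-- h gained 1 exactly when the string is a nonempty palindrome (the hit can only be at k = 0)
lemma kata_inner (a : List Char) : ∀ (m : Nat), m ≤ a.length → ∀ (h : Int),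
    (PySem.List.pyRange ((m : Int) - 1) (-1) (-1)).foldl (kataStep a) ((a.drop m).reverse, h)
      = (a.reverse, h + (if 0 < m ∧ a.reverse = a then 1 else 0)) := by
  intro m
  induction m with
  | zero =>
    intro _ h
    rw [PySem.List.pyRange_neg_one_eq_nil (by norm_num)]
    simp
  | succ m ih =>
    intro hm h
    have hmlt : m < a.length := by omega
    have hcast : ((m + 1 : Nat) : Int) - 1 = (m : Int) := by push_cast; ring
    rw [hcast, PySem.List.pyRange_neg_one_cons (by omega : (-1 : Int) < (m : Int))]
    simp only [List.foldl_cons]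
    have hb : kataStep a ((a.drop (m + 1)).reverse, h) (m : Int)
        = if m = 0 ∧ a.reverse = a then ((a.drop m).reverse, h + 1) else ((a.drop m).reverse, h) := by
      unfold kataStep
      have hget : PySem.List.pyGetD a (m : Int) ' ' = a[m] := by
        rw [PySem.List.pyGetD_natCast, List.getD_eq_getElem a ' ' hmlt]
      have hdrop : (a.drop (m + 1)).reverse ++ [a[m]] = (a.drop m).reverse := by
        rw [List.drop_eq_getElem_cons hmlt, List.reverse_cons]
      simp only [hget, hdrop]
      by_cases hm0 : m = 0
      · subst hm0
        simp only [List.drop_zero]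
        by_cases hp : a.reverse = a
        · rw [if_pos hp.symm]; simp [hp]
        · rw [if_neg (fun he => hp he.symm)]; simp [hp]
      · have hne : a ≠ (a.drop m).reverse := by
          intro he
          have := congrArg List.length he
          simp [List.length_drop] at this
          omega
        rw [if_neg hne]
        simp [hm0]
    rw [hb]
    by_cases hc : m = 0 ∧ a.reverse = a
    · rw [if_pos hc]
      obtain ⟨hm0, hp⟩ := hc
      subst hm0
      rw [PySem.List.pyRange_neg_one_eq_nil (by norm_num)]
      simp [hp]
    · rw [if_neg hc, ih (by omega) h]
      by_cases hm0 : m = 0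
      · subst hm0
        have hnp : ¬ a.reverse = a := fun hp => hc ⟨rfl, hp⟩
        simp [hnp]
      · simp only [show (0 < m ∧ a.reverse = a) ↔ (0 < m + 1 ∧ a.reverse = a) by
          constructor <;> (rintro ⟨_, hp⟩; exact ⟨by omega, hp⟩)]

-- A's per-string contribution equals B's 0/1 test
lemma kata_string (j : String) (h : Int) :
    ((PySem.List.pyRange ((j.toList.length : Int) - 1) (-1) (-1)).foldl
        (kataStep j.toList) ([], h)).2
      = if j.toList ≠ [] ∧ isPalGo j.toList 0 (j.toList.length - 1) then h + 1 else h := by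
  have h0 : (j.toList.drop j.toList.length).reverse = ([] : List Char) := by simp
  have hinv := kata_inner j.toList j.toList.length le_rfl h
  rw [h0] at hinv
  rw [hinv]
  by_cases hp : j.toList ≠ [] ∧ isPalGo j.toList 0 (j.toList.length - 1)
  · have hpal := (isPalGo_pal j.toList hp.1).mp hp.2
    rw [if_pos hp,
        if_pos (And.intro (List.length_pos_iff.mpr hp.1) hpal)]
  · rw [if_neg hp]
    have hnc : ¬ (0 < j.toList.length ∧ j.toList.reverse = j.toList) := by
      rintro ⟨h1, h2⟩
      have hne : j.toList ≠ [] := by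
        intro he; rw [he] at h1; simp at h1
      exact hp ⟨hne, (isPalGo_pal j.toList hne).mpr h2⟩
    simp only [if_neg hnc, add_zero]

-- the row functions of the two ports agree (A's [''] guard is redundant: '' is never counted)
lemma kata_row (h : Int) (row : List String) :
    kataRow h row
      = row.foldl (fun total s =>
          if s.toList ≠ [] ∧ isPalGo s.toList 0 (s.toList.length - 1) then total + 1 else total)
          h := by
  unfold kataRow
  have hstep : (fun (h : Int) (j : String) =>
      ((PySem.List.pyRange ((j.toList.length : Int) - 1) (-1) (-1)).foldl
        (kataStep j.toList) ([], h)).2)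
      = (fun total s =>
          if s.toList ≠ [] ∧ isPalGo s.toList 0 (s.toList.length - 1) then total + 1 else total) := by
    funext h j
    exact kata_string j h
  by_cases hr : row = [""]
  · subst hr
    simp
  · rw [if_neg hr]
    exact congrFun (congrFun (congrArg List.foldl hstep) h) row

theorem kata_eq_alt (kt : List (List String)) : kata kt = kata_alt kt := by
  unfold kata kata_alt
  rw [PySem.List.foldl_pyRange_zero_pyGetD]
  congr 1
  funext h row
  exact kata_row h row

-- ===== VERDICT (by name: the statement is the Claim_ definition above) =====
theorem kata_spec : Claim_equal_kata := by
  intro kt _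
  unfold Spec_kata
  exact kata_eq_alt kt
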